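-- pv_equiv track=rewrite | github.com/henriksb/CTF-Writeups | HelseCTF2024/stego/Zellweger/extract_lsb.py | extract_following_bits
-- ===== SOURCE A (Python) =====
-- def extract_following_bits(lsb_string, sequence_length=10):
--     """Hent binærteksten som inneholder flagget.
--         Dette må bli konvertert fra decabit til tekst
--         for å få flagget. https://www.dcode.fr/decabit-code"""
--     extracted_sequence = ""
--     index = 0
--     while index < len(lsb_string):
--         index = lsb_string.find('1', index)
--         if index == -1:
--             break
--         index += 1
--         if index + sequence_length <= len(lsb_string):
--             extracted_sequence += lsb_string[index:index + sequence_length] + " "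
--             index += sequence_length
--         else:
--             break
--     return extracted_sequence
-- ===== SOURCE B (Python) =====
-- def extract_following_bits(lsb_string, sequence_length=10):
--     """Single forward pass as a state machine: 'need' counts characters still
--     owed to the group opened by the last '1' marker; a complete group is
--     emitted with a trailing space, an incomplete trailing group is dropped."""
--     parts = []
--     grp = []
--     need = 0
--     for c in lsb_string:
--         if need:
--             grp.append(c)
--             need -= 1
--             if not need:
--                 parts.append(''.join(grp) + ' ')
--                 grp = []
--         elif c == '1':
--             need = sequence_length
--     return ''.join(parts)
-- ===== Notes on version B (the rewrite author's own statement) =====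
-- stated objective: alternative
-- what changed: Replaces the find/slice while-loop (repeated str.find and slicing with manual index arithmetic) by a single forward state-machine pass with a countdown of characters still owed to the current group; Pre_ excludes sequence_length < 1 on strings containing '1': for negative lengths A's index steps backwards and it loops forever, and for length 0 the degenerate corner (A emits a bare space per marker, B emits nothing for zero-length groups) is one where either value is defensible.
-- outside the precondition, e.g. on extract_following_bits('11', 0): A returns '  ', B returns ''; on extract_following_bits('1', -1): A does not finish within the time limit, B returns ''
import Mathlib
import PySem

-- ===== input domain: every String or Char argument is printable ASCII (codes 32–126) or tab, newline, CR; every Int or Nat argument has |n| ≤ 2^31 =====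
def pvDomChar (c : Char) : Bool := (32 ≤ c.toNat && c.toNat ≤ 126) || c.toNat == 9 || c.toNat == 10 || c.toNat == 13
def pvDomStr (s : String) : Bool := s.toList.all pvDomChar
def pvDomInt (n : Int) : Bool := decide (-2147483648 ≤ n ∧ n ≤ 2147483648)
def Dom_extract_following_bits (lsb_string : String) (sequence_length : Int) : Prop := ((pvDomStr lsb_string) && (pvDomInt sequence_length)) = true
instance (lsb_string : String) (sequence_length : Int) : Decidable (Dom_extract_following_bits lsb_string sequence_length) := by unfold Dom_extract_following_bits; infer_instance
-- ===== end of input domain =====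

-- B replaces A's find/slice while-loop by a single state-machine pass (objective: alternative).

-- ===== PORT A =====
-- A's while-loop: state = (index, extracted_sequence); fuel = len+1 bounds the
-- iterations (inside Pre_ the index strictly increases each round, so fuel never runs out).
def pvALoop (cs : List Char) (n : Int) : Nat → Int → List Char → List Char
  | 0, _, acc => acc
  | fuel + 1, index, acc =>
    if index < (cs.length : Int) then
      let j0 := PySem.Chars.findFrom cs ['1'] index none
      if j0 = -1 then acc
      else
        let j := j0 + 1
        if j + n ≤ (cs.length : Int) then
          pvALoop cs n fuel (j + n) (acc ++ PySem.List.slice cs (some j) (some (j + n)) ++ [' '])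
        else acc
    else acc

def extract_following_bits (lsb_string : String) (sequence_length : Int) : String :=
  String.ofList (pvALoop lsb_string.toList sequence_length (lsb_string.toList.length + 1) 0 [])

-- ===== PORT B =====
-- B's for-loop: state = (need, grp, parts); one step per character.
def pvBLoop (n : Int) : List Char → Int → List Char → List Char → List Char
  | [], _, _, parts => parts
  | c :: rest, need, grp, parts =>
    if need ≠ 0 then
      let grp' := grp ++ [c]
      let need' := need - 1
      if need' = 0 then pvBLoop n rest 0 [] (parts ++ (grp' ++ [' ']))
      else pvBLoop n rest need' grp' parts
    else if c = '1' then pvBLoop n rest n [] parts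
    else pvBLoop n rest 0 [] parts

def extract_following_bits_alt (lsb_string : String) (sequence_length : Int) : String :=
  String.ofList (pvBLoop sequence_length lsb_string.toList 0 [] [])

-- ===== PRECONDITION & SPEC =====
-- Pre_ excludes sequence_length < 1 on strings containing '1': for negative lengths A's
-- index steps backwards and its while-loop never terminates (Python A diverges), and for
-- length 0 the degenerate corner (A emits a bare space per marker, B emits nothing for
-- zero-length groups) is one where either value is defensible.
def Pre_extract_following_bits (lsb_string : String) (sequence_length : Int) : Prop :=
  1 ≤ sequence_length ∨ PySem.Str.isIn "1" lsb_string = false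
instance (lsb_string : String) (sequence_length : Int) : Decidable (Pre_extract_following_bits lsb_string sequence_length) := by unfold Pre_extract_following_bits; infer_instance
def pvWitness_extract_following_bits : String × Int := ("1011011", 2)

def Spec_extract_following_bits (lsb_string : String) (sequence_length : Int) (out : String) : Prop := out = extract_following_bits_alt lsb_string sequence_length
instance (lsb_string : String) (sequence_length : Int) (out : String) : Decidable (Spec_extract_following_bits lsb_string sequence_length out) := by unfold Spec_extract_following_bits; infer_instance

-- ===== CLAIM (what is proved, stated in full; the proofs are below) =====
def Claim_equal_extract_following_bits : Prop := ∀ (lsb_string : String) (sequence_length : Int), Dom_extract_following_bits lsb_string sequence_length → Pre_extract_following_bits lsb_string sequence_length → Spec_extract_following_bits lsb_string sequence_length (extract_following_bits lsb_string sequence_length)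

-- ===== LEMMAS AND PROOFS =====

-- Reference function: for each '1' marker, the next n characters (if available) plus a space.
def pvSpec (n : Nat) : List Char → List Char
  | [] => []
  | c :: rest =>
    if c = '1' then
      if n ≤ rest.length then rest.take n ++ ' ' :: pvSpec n (rest.drop n) else []
    else pvSpec n rest
termination_by l => l.length
decreasing_by
  all_goals simp

lemma pvSpec_nil (n : Nat) : pvSpec n [] = [] := by rw [pvSpec]

lemma pvSpec_cons_ne (n : Nat) (c : Char) (rest : List Char) (h : c ≠ '1') :
    pvSpec n (c :: rest) = pvSpec n rest := by
  rw [pvSpec]; simp [h]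

lemma pvSpec_skip (n : Nat) (p : Nat) : ∀ (l : List Char),
    (∀ i, i < p → ¬ ['1'] <+: l.drop i) → pvSpec n l = pvSpec n (l.drop p) := by
  induction p with
  | zero => intro l _; simp
  | succ p ih =>
    intro l h
    cases l with
    | nil => simp
    | cons c rest =>
      have hc : c ≠ '1' := by
        intro hc; exact h 0 (by omega) (by simp [hc])
      rw [pvSpec_cons_ne n c rest hc]
      have := ih rest (fun i hi => by
        have := h (i + 1) (by omega)
        simpa using this)
      simpa using this

lemma pvSpec_no_one (n : Nat) : ∀ (l : List Char), '1' ∉ l → pvSpec n l = [] := by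
  intro l h
  induction l with
  | nil => rw [pvSpec]
  | cons c rest ih =>
    have hc : c ≠ '1' := fun hc => h (by simp [hc])
    rw [pvSpec_cons_ne n c rest hc]
    exact ih (fun hm => h (List.mem_cons_of_mem _ hm))

-- ----- A-side: the fueled loop computes pvSpec -----
lemma pvALoop_eq (cs : List Char) (n : Int) (hn : 0 ≤ n) :
    ∀ (fuel : Nat) (k : Nat) (acc : List Char), cs.length < fuel + k →
      pvALoop cs n fuel (k : Int) acc = acc ++ pvSpec n.toNat (cs.drop k) := by
  intro fuel
  induction fuel with
  | zero =>
    intro k acc hf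
    rw [pvALoop, List.drop_eq_nil_of_le (by omega), pvSpec_nil, List.append_nil]
  | succ fuel ih =>
    intro k acc hf
    rw [pvALoop]
    by_cases hk : ((k : Int) < (cs.length : Int))
    · rw [if_pos hk]
      have hkle : k ≤ cs.length := by exact_mod_cast le_of_lt hk
      rw [PySem.Chars.findFrom_natCast cs ['1'] k hkle]
      by_cases hq1 : PySem.Chars.find (cs.drop k) ['1'] = -1
      · rw [if_pos hq1]
        have : '1' ∉ cs.drop k := by
          rw [← List.singleton_infix_iff]
          exact (PySem.Chars.find_eq_neg_one_iff _ _).mp hq1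
        rw [pvSpec_no_one _ _ this, List.append_nil]
        simp
      · rw [if_neg hq1]
        have hq0 : 0 ≤ PySem.Chars.find (cs.drop k) ['1'] := by
          have := PySem.Chars.neg_one_le_find (cs.drop k) ['1']
          omega
        obtain ⟨hpre, hmin⟩ := PySem.Chars.find_spec hq0
        set p := (PySem.Chars.find (cs.drop k) ['1']).toNat with hp
        have hqp : PySem.Chars.find (cs.drop k) ['1'] = (p : Int) := by omega
        obtain ⟨t, ht⟩ := hpre
        have hdkp : cs.drop (k + p) = '1' :: t := by
          rw [← List.drop_drop, ht.symm]; rfl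
        have hdkp1 : cs.drop (k + p + 1) = t := by
          rw [← List.drop_drop (i := 1) (j := k + p), hdkp]
          simp
        have hspk : pvSpec n.toNat (cs.drop k) = pvSpec n.toNat ('1' :: t) := by
          rw [pvSpec_skip n.toNat p (cs.drop k) hmin, List.drop_drop, hdkp]
        rw [hspk, pvSpec, if_pos rfl]
        have hlen : cs.length = k + p + 1 + t.length := by
          have h1 : (cs.drop (k + p)).length = t.length + 1 := by rw [hdkp]; simp
          simp only [List.length_drop] at h1
          have : k + p ≤ cs.length := by
            by_contra hcon
            rw [List.drop_eq_nil_of_le (by omega)] at hdkp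
            simp at hdkp
          omega
        rw [if_neg (show ¬ ((k:Int) + PySem.Chars.find (cs.drop k) ['1'] = -1) by omega)]
        by_cases hroom : ((k:Int) + PySem.Chars.find (cs.drop k) ['1'] + 1 + n ≤ (cs.length : Int))
        · rw [if_pos hroom, if_pos (show n.toNat ≤ t.length by
            rw [hqp] at hroom; push_cast [hlen] at hroom; omega)]
          have hslice : PySem.List.slice cs (some ((k:Int) + PySem.Chars.find (cs.drop k) ['1'] + 1))
              (some ((k:Int) + PySem.Chars.find (cs.drop k) ['1'] + 1 + n)) = t.take n.toNat := by
            have hb : ((k:Int) + PySem.Chars.find (cs.drop k) ['1'] + 1) = ((k + p + 1 : Nat) : Int) := by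
              rw [hqp]; push_cast; ring
            rw [hb, show ((k + p + 1 : Nat) : Int) + n = ((k + p + 1 : Nat) : Int) + ((n.toNat : Nat) : Int) by omega,
                PySem.List.slice_natCast_add cs (k + p + 1) n.toNat, hdkp1]
          rw [hslice]
          have hidx : ((k:Int) + PySem.Chars.find (cs.drop k) ['1'] + 1 + n)
              = (((k + p + 1 + n.toNat : Nat)) : Int) := by rw [hqp]; push_cast; omega
          rw [hidx, ih (k + p + 1 + n.toNat) _ (by omega)]
          have hdt : cs.drop (k + p + 1 + n.toNat) = t.drop n.toNat := by
            rw [← List.drop_drop (i := n.toNat) (j := k + p + 1), hdkp1]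
          rw [hdt]
          simp
        · rw [if_neg hroom, if_neg (show ¬ (n.toNat ≤ t.length) by
            rw [hqp] at hroom; push_cast [hlen] at hroom; omega), List.append_nil]
    · rw [if_neg hk, List.drop_eq_nil_of_le (by omega), pvSpec_nil, List.append_nil]

-- ----- B-side -----
lemma pvBLoop_collect (n : Int) : ∀ (cs : List Char) (m : Int) (g acc : List Char), 0 < m →
    pvBLoop n cs m g acc =
      if m ≤ (cs.length : Int) then
        pvBLoop n (cs.drop m.toNat) 0 [] (acc ++ (g ++ cs.take m.toNat ++ [' ']))
      else acc := by
  intro cs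
  induction cs with
  | nil =>
    intro m g acc hm
    rw [pvBLoop]
    rw [if_neg (by simp; omega)]
  | cons c rest ih =>
    intro m g acc hm
    rw [pvBLoop]
    rw [if_pos (by omega)]
    by_cases h1 : m - 1 = 0
    · have hm1 : m = 1 := by omega
      subst hm1
      simp only [if_pos h1]
      rw [if_pos (by simp)]
      simp
    · simp only [if_neg h1]
      rw [ih (m - 1) (g ++ [c]) acc (by omega)]
      have hmt : m.toNat = (m - 1).toNat + 1 := by omega
      by_cases h2 : m - 1 ≤ (rest.length : Int)
      · rw [if_pos h2, if_pos (by simp at h2 ⊢; omega)]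
        rw [hmt]
        simp only [List.drop_succ_cons, List.take_succ_cons]
        simp
      · rw [if_neg h2, if_neg (by simp at h2 ⊢; omega)]

lemma pvBLoop_eq (n : Int) (hn : 0 < n) :
    ∀ (len : Nat) (cs : List Char), cs.length ≤ len → ∀ (acc : List Char),
      pvBLoop n cs 0 [] acc = acc ++ pvSpec n.toNat cs := by
  intro len
  induction len with
  | zero =>
    intro cs hcs acc
    have : cs = [] := List.eq_nil_of_length_eq_zero (by omega)
    subst this
    rw [pvBLoop, pvSpec_nil, List.append_nil]
  | succ len ih =>
    intro cs hcs acc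
    cases cs with
    | nil => rw [pvBLoop, pvSpec_nil, List.append_nil]
    | cons c rest =>
      rw [pvBLoop]
      rw [if_neg (show ¬ ((0:Int) ≠ 0) by simp)]
      by_cases hc : c = '1'
      · subst hc
        rw [if_pos rfl, pvSpec]
        rw [if_pos rfl, pvBLoop_collect n rest n [] acc hn]
        have hrest : rest.length ≤ len := by simp at hcs; omega
        have hiff : n ≤ (rest.length : Int) ↔ n.toNat ≤ rest.length := by omega
        by_cases h2 : n ≤ (rest.length : Int)
        · rw [if_pos h2, if_pos (hiff.mp h2)]
          rw [ih (rest.drop n.toNat) (by simp; omega) (acc ++ ([] ++ rest.take n.toNat ++ [' ']))]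
          simp
        · rw [if_neg h2, if_neg (fun hh => h2 (hiff.mpr hh))]
          simp
      · rw [if_neg hc, pvSpec_cons_ne _ _ _ hc,
            ih rest (by simp at hcs; omega) acc]

lemma pvBLoop_no_one (n : Int) : ∀ (cs : List Char), '1' ∉ cs → pvBLoop n cs 0 [] [] = [] := by
  intro cs h
  induction cs with
  | nil => rw [pvBLoop]
  | cons c rest ih =>
    have hc : c ≠ '1' := fun hc => h (by simp [hc])
    rw [pvBLoop]
    rw [if_neg (show ¬ ((0:Int) ≠ 0) by simp), if_neg hc]
    exact ih (fun hm => h (List.mem_cons_of_mem _ hm))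

-- ===== VERDICT (by name: the statement is the Claim_ definition above) =====
theorem extract_following_bits_spec : Claim_equal_extract_following_bits := by
  intro s n _ hpre
  unfold Spec_extract_following_bits extract_following_bits extract_following_bits_alt
  by_cases hn : 1 ≤ n
  · rw [pvBLoop_eq n (by omega) s.toList.length s.toList (le_refl _) [],
        show (0:Int) = ((0:Nat):Int) by norm_num,
        pvALoop_eq s.toList n (by omega) (s.toList.length + 1) 0 [] (by omega)]
    simp
  · have hno : '1' ∉ s.toList := by
      rcases hpre with h | h
      · omega
      · rw [← List.singleton_infix_iff]
        have h2 := (PySem.Chars.isIn_eq_false_iff ("1":String).toList s.toList).mp (by simpa using h)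
        simpa using h2
    rw [pvBLoop_no_one n s.toList hno]
    rw [pvALoop]
    by_cases h0 : ((0:Int) < (s.toList.length : Int))
    · rw [if_pos h0]
      have hfind : PySem.Chars.findFrom s.toList ['1'] 0 none = -1 := by
        rw [show (0:Int) = ((0:Nat):Int) by norm_num,
            PySem.Chars.findFrom_natCast s.toList ['1'] 0 (by omega)]
        rw [if_pos ((PySem.Chars.find_eq_neg_one_iff _ _).mpr (by
          rw [List.singleton_infix_iff]; simpa using hno))]
      simp only [hfind]
      simp
    · rw [if_neg h0]
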